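-- pv_equiv track=rewrite | github.com/irtiza1999/Regular-Expression-to-DFA | main.py | lastposCheck
-- ===== SOURCE A (Python) =====
-- def nullableCheck(tree, node):
--     if node not in tree:
--         return False
--     else:
--         if node[0] =="|":
--             left=nullableCheck(tree, tree[node][0][0])
--             right=nullableCheck(tree, tree[node][0][1])
--             return left or right
--         elif node[0] ==".":
--             left=nullableCheck(tree, tree[node][0][0])
--             right=nullableCheck(tree, tree[node][0][1])
--             return left and right
--         elif node[0] =="*":
--             return True
--
-- def lastposCheck(tree, node):
--     if node not in tree:
--         return {node[1]}
--     else: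
--         if node[0] == "|":
--             left = lastposCheck(tree, tree[node][0][0])
--             right = lastposCheck(tree, tree[node][0][1])
--             result = left.union(right)
--             return result
--         elif node[0] == ".":
--             left = lastposCheck(tree, tree[node][0][0])
--             right = lastposCheck(tree, tree[node][0][1])
--             rightNull = nullableCheck(tree, tree[node][0][1])
--             if rightNull == True:
--                 result = left.union(right)
--                 return result
--             else:
--                 result = right
--                 return result
--         else:
--             result = lastposCheck(tree, tree[node][0][0])
--             return result
-- ===== SOURCE B (Python) =====
-- def lastposCheck(tree, node):
--     # one fused traversal computing (nullable, lastpos) together, so nullable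
--     # is never recomputed by a second recursion under '.' nodes
--     def walk(n):
--         if n not in tree:
--             return (False, {n[1]})
--         c = tree[n][0]
--         op = n[0]
--         if op == "|":
--             ln, lp = walk(c[0])
--             rn, rp = walk(c[1])
--             return (ln or rn, lp | rp)
--         if op == ".":
--             ln, lp = walk(c[0])
--             rn, rp = walk(c[1])
--             return (ln and rn, (lp | rp) if rn else rp)
--         if op == "*":
--             return (True, walk(c[0])[1])
--         return (False, walk(c[0])[1])
--     return walk(node)[1]
-- ===== Notes on version B (the rewrite author's own statement) =====
-- stated objective: alternative
-- what changed: A walks the tree with two separate recursions, re-deriving nullable of the whole right subtree under every '.' node; B makes one fused traversal that returns the (nullable, lastpos) pair for each node, so every node is visited once.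
import Mathlib
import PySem

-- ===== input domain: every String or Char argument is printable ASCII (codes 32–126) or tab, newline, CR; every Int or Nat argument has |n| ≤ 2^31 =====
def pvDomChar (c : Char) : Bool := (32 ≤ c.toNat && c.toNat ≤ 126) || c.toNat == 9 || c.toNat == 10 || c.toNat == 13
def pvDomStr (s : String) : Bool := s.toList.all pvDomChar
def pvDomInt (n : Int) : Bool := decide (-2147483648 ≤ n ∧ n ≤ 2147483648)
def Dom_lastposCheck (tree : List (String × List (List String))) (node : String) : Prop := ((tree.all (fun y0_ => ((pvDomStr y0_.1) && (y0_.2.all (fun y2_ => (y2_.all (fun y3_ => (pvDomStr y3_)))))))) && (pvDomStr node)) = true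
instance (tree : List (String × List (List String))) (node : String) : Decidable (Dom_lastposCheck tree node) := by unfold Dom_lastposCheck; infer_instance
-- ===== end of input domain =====

-- B replaces A's two separate recursions (nullable re-derived under every '.' node) by one
-- fused traversal returning the (nullable, lastpos) pair per node; every node is visited once.

-- ===== PORT A =====
-- fuel makes A's unbounded Python recursion total; Pre_ guarantees fuel is never exhausted
def nullableCheckF (tree : List (String × List (List String))) : Nat → String → Bool
  | 0, _ => false
  | fuel+1, node =>
    match tree.lookup node with
    | none => false
    | some vs =>
      match PySem.Str.pyGet? node 0 with
      | none => false        -- node = "": Python raises IndexError (excluded by Pre_)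
      | some op =>
        if op = '|' then
          match PySem.List.pyGet? vs 0 with
          | none => false    -- IndexError (excluded by Pre_)
          | some c =>
            match PySem.List.pyGet? c 0, PySem.List.pyGet? c 1 with
            | some a, some b => nullableCheckF tree fuel a || nullableCheckF tree fuel b
            | _, _ => false  -- IndexError (excluded by Pre_)
        else if op = '.' then
          match PySem.List.pyGet? vs 0 with
          | none => false
          | some c =>
            match PySem.List.pyGet? c 0, PySem.List.pyGet? c 1 with
            | some a, some b => nullableCheckF tree fuel a && nullableCheckF tree fuel b
            | _, _ => false
        else if op = '*' then true
        else false           -- Python returns None; it is only ever tested '== True'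

def lastposF (tree : List (String × List (List String))) : Nat → String → List String
  | 0, _ => []
  | fuel+1, node =>
    match tree.lookup node with
    | none =>
      match PySem.Str.pyGet? node 1 with
      | none => []           -- node shorter than 2: Python raises IndexError (excluded by Pre_)
      | some ch => [String.singleton ch]     -- {node[1]}
    | some vs =>
      match PySem.Str.pyGet? node 0 with
      | none => []           -- IndexError (excluded by Pre_)
      | some op =>
        if op = '|' then
          match PySem.List.pyGet? vs 0 with
          | none => []
          | some c =>
            match PySem.List.pyGet? c 0, PySem.List.pyGet? c 1 with
            | some a, some b =>
              PySem.Set.union (lastposF tree fuel a) (lastposF tree fuel b)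
            | _, _ => []
        else if op = '.' then
          match PySem.List.pyGet? vs 0 with
          | none => []
          | some c =>
            match PySem.List.pyGet? c 0, PySem.List.pyGet? c 1 with
            | some a, some b =>
              let left := lastposF tree fuel a
              let right := lastposF tree fuel b
              let rightNull := nullableCheckF tree fuel b
              if rightNull then PySem.Set.union left right else right
            | _, _ => []
        else
          match PySem.List.pyGet? vs 0 with
          | none => []
          | some c =>
            match PySem.List.pyGet? c 0 with
            | some a => lastposF tree fuel a
            | none => []

def lastposCheck (tree : List (String × List (List String))) (node : String) : List String :=
  lastposF tree (tree.length + 1) node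

-- ===== PORT B =====
-- walk: one recursion returning (nullable, lastpos) together; same fuel discipline
def walkF (tree : List (String × List (List String))) : Nat → String → Bool × List String
  | 0, _ => (false, [])
  | fuel+1, n =>
    match tree.lookup n with
    | none =>
      match PySem.Str.pyGet? n 1 with
      | none => (false, [])  -- IndexError (excluded by Pre_)
      | some ch => (false, [String.singleton ch])
    | some vs =>
      match PySem.Str.pyGet? n 0, PySem.List.pyGet? vs 0 with
      | some op, some c =>
        if op = '|' then
          match PySem.List.pyGet? c 0, PySem.List.pyGet? c 1 with
          | some a, some b =>
            let l := walkF tree fuel a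
            let r := walkF tree fuel b
            (l.1 || r.1, PySem.Set.union l.2 r.2)
          | _, _ => (false, [])
        else if op = '.' then
          match PySem.List.pyGet? c 0, PySem.List.pyGet? c 1 with
          | some a, some b =>
            let l := walkF tree fuel a
            let r := walkF tree fuel b
            (l.1 && r.1, if r.1 then PySem.Set.union l.2 r.2 else r.2)
          | _, _ => (false, [])
        else if op = '*' then
          match PySem.List.pyGet? c 0 with
          | some a => (true, (walkF tree fuel a).2)
          | none => (true, [])
        else
          match PySem.List.pyGet? c 0 with
          | some a => (false, (walkF tree fuel a).2)
          | none => (false, [])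
      | none, _ => (false, [])   -- n[0] IndexError in Python (excluded by Pre_)
      | some op, none => (op = '*', [])   -- tree[n][0] IndexError in Python (excluded by Pre_);
                                          -- dead branch's value chosen to agree with A's port

def lastposCheck_alt (tree : List (String × List (List String))) (node : String) : List String :=
  (walkF tree (tree.length + 1) node).2

-- ===== PRECONDITION & SPEC =====
-- the child strings A's recursion visits from a key (empty for non-keys)
def childStrs (tree : List (String × List (List String))) (s : String) : List String :=
  match tree.lookup s with
  | none => []
  | some vs =>
    match PySem.Str.pyGet? s 0, PySem.List.pyGet? vs 0 with
    | some op, some c => if op = '|' ∨ op = '.' then c.take 2 else c.take 1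
    | _, _ => []

-- saturating reachability: everything A's recursion visits starting from the given strings
def reachFrom (tree : List (String × List (List String))) (start : List String) : List String :=
  (List.range (tree.length + 1)).foldl
    (fun acc _ => (acc ++ acc.flatMap (childStrs tree)).dedup) start

-- what Python needs at one visited string so no IndexError occurs there
def entryShapeOK (tree : List (String × List (List String))) (s : String) : Bool :=
  if (tree.map Prod.fst).contains s then
    match tree.lookup s, PySem.Str.pyGet? s 0 with
    | some vs, some op =>
      match PySem.List.pyGet? vs 0 with
      | some c => if op = '|' ∨ op = '.' then (PySem.List.pyGet? c 1).isSome
                  else (PySem.List.pyGet? c 0).isSome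
      | none => false
    | _, _ => false
  else decide (2 ≤ s.toList.length)

-- Pre_ excludes exactly the inputs on which Python A raises: an IndexError at a string the
-- recursion visits (a non-key string shorter than 2, an empty key, a missing child entry) or a
-- RecursionError (a visited key that can reach itself, i.e. a cycle reachable from node).
def Pre_lastposCheck (tree : List (String × List (List String))) (node : String) : Prop :=
  ((reachFrom tree [node]).all (fun s =>
    entryShapeOK tree s &&
    (!((tree.map Prod.fst).contains s) ||
      !((reachFrom tree (childStrs tree s)).contains s)))) = true

instance (tree : List (String × List (List String))) (node : String) :
    Decidable (Pre_lastposCheck tree node) := by unfold Pre_lastposCheck; infer_instance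

def pvWitness_lastposCheck : (List (String × List (List String))) × String :=
  ([("|0", [["a1", "b2"]])], "|0")

def Spec_lastposCheck (tree : List (String × List (List String))) (node : String) (out : List String) : Prop := out = lastposCheck_alt tree node
instance (tree : List (String × List (List String))) (node : String) (out : List String) : Decidable (Spec_lastposCheck tree node out) := by unfold Spec_lastposCheck; infer_instance

-- ===== CLAIM (what is proved, stated in full; the proofs are below) =====
def Claim_equal_lastposCheck : Prop := ∀ (tree : List (String × List (List String))) (node : String), Dom_lastposCheck tree node → Pre_lastposCheck tree node → Spec_lastposCheck tree node (lastposCheck tree node)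

-- ===== LEMMAS AND PROOFS =====

-- the fused pass computes exactly the pair of A's two recursions, at every fuel
theorem walkF_pair (tree : List (String × List (List String))) :
    ∀ fuel s, walkF tree fuel s = (nullableCheckF tree fuel s, lastposF tree fuel s) := by
  intro fuel
  induction fuel with
  | zero => intro s; rfl
  | succ f ih =>
    intro s
    cases hl : tree.lookup s with
    | none =>
      cases h1 : PySem.List.pyGet? s.toList 1 <;>
        simp [walkF, nullableCheckF, lastposF, PySem.Str.pyGet?, hl, h1]
    | some vs =>
      cases hop : PySem.List.pyGet? s.toList 0 with
      | none => simp [walkF, nullableCheckF, lastposF, PySem.Str.pyGet?, hl, hop]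
      | some op =>
        cases hc : PySem.List.pyGet? vs 0 with
        | none =>
          by_cases h1 : op = '|' <;> by_cases h2 : op = '.' <;> by_cases h3 : op = '*' <;>
            simp_all [walkF, nullableCheckF, lastposF, PySem.Str.pyGet?]
        | some c =>
          by_cases h1 : op = '|'
          · subst h1
            cases ha : PySem.List.pyGet? c 0 <;> cases hb : PySem.List.pyGet? c 1 <;>
              simp [walkF, nullableCheckF, lastposF, PySem.Str.pyGet?, hl, hop, hc, ha, hb, ih]
          · by_cases h2 : op = '.'
            · subst h2
              cases ha : PySem.List.pyGet? c 0 <;> cases hb : PySem.List.pyGet? c 1 <;>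
                simp [walkF, nullableCheckF, lastposF, PySem.Str.pyGet?, hl, hop, hc, ha, hb, ih]
            · by_cases h3 : op = '*'
              · subst h3
                cases ha : PySem.List.pyGet? c 0 <;>
                  simp [walkF, nullableCheckF, lastposF, PySem.Str.pyGet?, hl, hop, hc, ha, ih]
              · cases ha : PySem.List.pyGet? c 0 <;>
                  simp [walkF, nullableCheckF, lastposF, PySem.Str.pyGet?, hl, hop, hc, ha, ih, h1, h2, h3]

-- ===== VERDICT (by name: the statement is the Claim_ definition above) =====
theorem lastposCheck_spec : Claim_equal_lastposCheck := by
  unfold Claim_equal_lastposCheck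
  intro tree node _ _
  unfold Spec_lastposCheck lastposCheck lastposCheck_alt
  rw [walkF_pair]
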